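/- GENERATED by tools/from_farm_form.py from prooffarm-gif/accepted/DGifGetImageHeader.5/Proof.lean (a worked proof of the farm's unit `DGifGetImageHeader.5`,
   accepted by the verdict) — do not edit. -/
import Gif.Spec.Units.DGifGetImageHeader_5
import Gif.Spec.AllSegs
import Gif.Spec.Proved.DGifGetImageHeader_5_Lemmas

open X86 X86.User Asan ProgX.Base ProgX.Base.Spec Gif.Spec

/-!
  `DGifGetImageHeader.5` (0x10902f … 0x1090ce, 38 instructions; dgif_lib.c:412-414 and the `i++` of l.404): ONE ROUND OF THE COLOUR
  LOOP behind `InternalRead(Buf, 3)`: `Colors[i].Red = Buf[0]`, `.Green = Buf[1]`, `.Blue = Buf[2]`, each a checked byte store into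
  the colour array of the adopted local map (a DATA object of the forest: `Loose.data`), with the checked loads of
  `gif.Image.ColorMap` (inside gif) and of its `Colors` field (inside the map object); then `i++` and back to the loop head with
  the measure `ColorCount − i` one smaller. The whole segment is one walk (Lemmas.lean `gih5_seg`, 7 check sites); `Body` is
  carried over its footprint (own stack below the protected frame + the colour array) by `gih5_body_carry`.
-/

/-- Segment 5 of `DGifGetImageHeader` takes `Colour m` at 0x10902f to `Head m'` at 0x108ffe with `m' < m`. -/
theorem Gif.Spec.Proved.DGifGetImageHeader_5_ok : Gif.Spec.DGifGetImageHeader_5.Statement := by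
  intro Lay hLay μ hμ u₀ hcode h_asan_load8_noabort h_asan_store1_noabort H rest frames F R e ret m Hc Fc v hat
  -- 0x10902f … 0x1090c9 `jmp 108ffe`
  exact Gif.Spec.DGifGetImageHeader_5.gih5_seg Lay hLay μ hμ u₀ hcode h_asan_load8_noabort h_asan_store1_noabort
    H rest frames F R e ret m Hc Fc v hat
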